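-- pv_equiv track=rewrite | github.com/happylihappyli/BPython | fix_aliases.py | normalize_encoding
-- ===== SOURCE A (Python) =====
-- def normalize_encoding(encoding):
--     chars = []
--     punct = False
--     for c in encoding:
--         if c.isalnum() or c == '.':
--             if punct and chars:
--                 chars.append('_')
--             chars.append(c)
--             punct = False
--         else:
--             punct = True
--     return ''.join(chars)
-- ===== SOURCE B (Python) =====
-- def normalize_encoding(encoding):
--     # tokenize: maximal runs of kept characters, then join with '_'
--     tokens = []
--     cur = ''
--     for c in encoding:
--         if c.isalnum() or c == '.':
--             cur += c
--         else:
--             if cur: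
--                 tokens.append(cur)
--             cur = ''
--     if cur:
--         tokens.append(cur)
--     return '_'.join(tokens)
-- ===== Notes on version B (the rewrite author's own statement) =====
-- stated objective: idiomatic
-- what changed: B tokenizes the string into maximal runs of kept characters (alnum or '.') and joins the tokens with '_', replacing A's lazy punct-flag underscore insertion.
import Mathlib
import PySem

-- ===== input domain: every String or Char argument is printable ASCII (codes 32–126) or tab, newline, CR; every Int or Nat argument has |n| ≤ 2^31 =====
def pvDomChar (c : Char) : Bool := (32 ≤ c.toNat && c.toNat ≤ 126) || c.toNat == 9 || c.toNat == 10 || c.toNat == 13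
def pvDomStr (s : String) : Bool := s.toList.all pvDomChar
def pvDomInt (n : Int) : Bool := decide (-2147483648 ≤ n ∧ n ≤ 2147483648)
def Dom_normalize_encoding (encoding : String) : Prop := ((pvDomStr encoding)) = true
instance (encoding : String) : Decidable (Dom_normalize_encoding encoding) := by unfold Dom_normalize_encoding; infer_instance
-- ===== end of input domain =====

-- B tokenizes into maximal runs of kept characters and joins with '_', replacing A's punct-flag lazy underscore insertion; same values, same cost.

-- ===== PORT A =====
-- c.isalnum() or c == '.'
def pvKeep (c : Char) : Bool := PySem.Chars.isalnum c || c == '.'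

-- one iteration of A's for-loop over state (chars, punct)
def pvStepA (st : List Char × Bool) (c : Char) : List Char × Bool :=
  if pvKeep c then
    (((if st.2 = true ∧ st.1 ≠ [] then st.1 ++ ['_'] else st.1) ++ [c]), false)
  else
    (st.1, true)

def normalize_encoding (encoding : String) : String :=
  String.ofList (encoding.toList.foldl pvStepA ([], false)).1

-- ===== PORT B =====
-- '_'.join(tokens)  (tokens are nonempty runs)
def pvJoinU : List (List Char) → List Char
  | [] => []
  | [t] => t
  | t :: t' :: ts => t ++ '_' :: pvJoinU (t' :: ts)

-- one iteration of B's for-loop over state (tokens, cur)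
def pvStepB (st : List (List Char) × List Char) (c : Char) : List (List Char) × List Char :=
  if pvKeep c then
    (st.1, st.2 ++ [c])
  else
    ((if st.2 = [] then st.1 else st.1 ++ [st.2]), [])

def normalize_encoding_alt (encoding : String) : String :=
  let st := encoding.toList.foldl pvStepB ([], [])
  String.ofList (pvJoinU (if st.2 = [] then st.1 else st.1 ++ [st.2]))

-- ===== PRECONDITION & SPEC =====
def Spec_normalize_encoding (encoding : String) (out : String) : Prop := out = normalize_encoding_alt encoding
instance (encoding : String) (out : String) : Decidable (Spec_normalize_encoding encoding out) := by unfold Spec_normalize_encoding; infer_instance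

-- ===== CLAIM (what is proved, stated in full; the proofs are below) =====
def Claim_equal_normalize_encoding : Prop := ∀ (encoding : String), Dom_normalize_encoding encoding → Spec_normalize_encoding encoding (normalize_encoding encoding)

-- ===== LEMMAS AND PROOFS =====

lemma pvJoinU_append_singleton (ts : List (List Char)) (x : List Char) :
    pvJoinU (ts ++ [x]) = if ts = [] then x else pvJoinU ts ++ '_' :: x := by
  induction ts with
  | nil => simp [pvJoinU]
  | cons t ts ih =>
    cases ts with
    | nil => simp [pvJoinU]
    | cons t' ts' =>
      simp only [List.cons_append, pvJoinU]
      rw [show t' :: (ts' ++ [x]) = (t' :: ts') ++ [x] from rfl, ih]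
      simp

lemma pvJoinU_ne_nil (ts : List (List Char)) (hne : ts ≠ [])
    (h : ∀ t ∈ ts, t ≠ []) : pvJoinU ts ≠ [] := by
  cases ts with
  | nil => exact absurd rfl hne
  | cons t ts' =>
    cases ts' with
    | nil => simpa [pvJoinU] using h t (by simp)
    | cons t' ts'' =>
      simp only [pvJoinU, ne_eq, List.append_eq_nil_iff, List.cons_ne_nil, and_false,
        not_false_eq_true]

/-- render B's state the way B's final join does -/
def pvRender (tokens : List (List Char)) (cur : List Char) : List Char :=
  pvJoinU (if cur = [] then tokens else tokens ++ [cur])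

/-- loop invariant: A's chars are the rendering of B's state; the flags line up. -/
lemma pv_loop (cs : List Char) :
    ∀ (chars : List Char) (punct : Bool) (tokens : List (List Char)) (cur : List Char),
    chars = pvRender tokens cur →
    (punct = true → cur = []) →
    (punct = false → cur = [] → tokens = []) →
    (∀ t ∈ tokens, t ≠ []) →
    (cs.foldl pvStepA (chars, punct)).1 =
      pvRender (cs.foldl pvStepB (tokens, cur)).1 (cs.foldl pvStepB (tokens, cur)).2 := by
  induction cs with
  | nil => intro chars punct tokens cur h1 _ _ _; simpa using h1
  | cons c cs ih =>
    intro chars punct tokens cur h1 h2 h3 h4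
    simp only [List.foldl_cons]
    by_cases hk : pvKeep c = true
    · -- kept character
      cases punct with
      | false =>
        by_cases hc : cur = []
        · -- start of the string: everything empty
          have ht : tokens = [] := h3 rfl hc
          subst ht; subst hc
          simp only [pvRender] at h1
          subst h1
          simp only [pvStepA, pvStepB, hk]
          apply ih <;> simp [pvRender, pvJoinU]
        · -- extend the current token
          have hA : pvStepA (chars, false) c = (chars ++ [c], false) := by
            simp [pvStepA, hk]
          have hB : pvStepB (tokens, cur) c = (tokens, cur ++ [c]) := by
            simp [pvStepB, hk]
          rw [hA, hB]
          apply ih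
          · subst h1
            simp only [pvRender, if_neg hc, if_neg (by simp : ¬(cur ++ [c] = []))]
            rw [pvJoinU_append_singleton, pvJoinU_append_singleton]
            by_cases ht : tokens = [] <;> simp [ht]
          · simp
          · intro _ h; exact absurd h (by simp)
          · exact h4
      | true =>
        have hc : cur = [] := h2 rfl
        subst hc
        have hchars : chars = pvJoinU tokens := by simpa [pvRender] using h1
        have hA : pvStepA (chars, true) c =
            ((if tokens = [] then chars else chars ++ ['_']) ++ [c], false) := by
          by_cases ht : tokens = []
          · have : chars = [] := by simp [hchars, ht, pvJoinU]
            simp [pvStepA, hk, this, ht]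
          · have hne : chars ≠ [] := hchars ▸ pvJoinU_ne_nil tokens ht h4
            simp [pvStepA, hk, hne, ht]
        have hB : pvStepB (tokens, ([] : List Char)) c = (tokens, [c]) := by
          simp [pvStepB, hk]
        rw [hA, hB]
        apply ih
        · simp only [pvRender, if_neg (by simp : ¬([c] : List Char) = [])]
          rw [pvJoinU_append_singleton]
          by_cases ht : tokens = [] <;> simp [ht, hchars, pvJoinU]
        · simp
        · intro _ h; exact absurd h (by simp)
        · exact h4
    · -- punctuation: A sets the flag, B closes the current token
      have hA : pvStepA (chars, punct) c = (chars, true) := by simp [pvStepA, hk]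
      have hB : pvStepB (tokens, cur) c =
          ((if cur = [] then tokens else tokens ++ [cur]), []) := by simp [pvStepB, hk]
      rw [hA, hB]
      apply ih
      · subst h1; by_cases hc : cur = [] <;> simp [pvRender, hc]
      · intro _; rfl
      · simp
      · intro t ht
        by_cases hc : cur = []
        · simp only [if_pos hc] at ht; exact h4 t ht
        · simp only [if_neg hc, List.mem_append, List.mem_singleton] at ht
          rcases ht with ht | ht
          · exact h4 t ht
          · exact ht ▸ hc

-- ===== VERDICT (by name: the statement is the Claim_ definition above) =====
theorem normalize_encoding_spec : Claim_equal_normalize_encoding := by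
  intro encoding _
  unfold Spec_normalize_encoding normalize_encoding normalize_encoding_alt
  have := pv_loop encoding.toList [] false [] []
    (by simp [pvRender, pvJoinU]) (by intro _; rfl) (by intro _ _; rfl) (by simp)
  simp only [pvRender] at this
  rw [this]
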